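-- pv_equiv track=rewrite | github.com/huggin/gfg | stack_queue/save_gotham.py | save_gotham
-- ===== SOURCE A (Python) =====
-- def save_gotham (arr, n) :
--     #Complete the function
--     s = []
--     ans = []
--     for j in range(n-1, -1, -1):
--         while len(s) > 0 and s[-1] <= arr[j]:
--             s.pop()
--         if len(s) == 0:
--             ans.append(0)
--         else:
--             ans.append(s[-1])
--         s.append(arr[j])
--
--     return sum(ans) % 1000000001
-- ===== SOURCE B (Python) =====
-- def save_gotham(arr, n):
--     # left-to-right: keep values still waiting for a strictly greater element;
--     # when y arrives it resolves (and pays for) every pending value below it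
--     total = 0
--     pending = []
--     for k in range(n):
--         y = arr[k]
--         while pending and pending[-1] < y:
--             pending.pop()
--             total += y
--         pending.append(y)
--     return total % 1000000001
-- ===== Notes on version B (the rewrite author's own statement) =====
-- stated objective: alternative
-- what changed: Replaced A's right-to-left sweep (pop while <=, build an ans list of next-greater values, sum it at the end) with a left-to-right scan that keeps the values still awaiting a strictly greater element and adds each one's answer to a running total the moment that greater element arrives.
import Mathlib
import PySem

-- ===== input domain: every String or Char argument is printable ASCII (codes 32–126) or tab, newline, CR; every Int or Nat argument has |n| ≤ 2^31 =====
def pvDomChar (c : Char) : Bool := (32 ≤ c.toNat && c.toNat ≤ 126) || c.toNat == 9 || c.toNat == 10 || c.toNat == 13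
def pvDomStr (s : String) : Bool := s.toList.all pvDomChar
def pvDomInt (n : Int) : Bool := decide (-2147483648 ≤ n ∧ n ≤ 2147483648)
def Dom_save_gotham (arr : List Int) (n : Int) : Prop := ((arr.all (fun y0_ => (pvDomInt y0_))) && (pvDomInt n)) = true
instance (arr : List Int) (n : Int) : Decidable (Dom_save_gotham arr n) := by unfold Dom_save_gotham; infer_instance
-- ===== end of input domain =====

-- B replaces A's right-to-left sweep (pop while <=, build an ans list, sum it) with a
-- left-to-right scan keeping the values still awaiting a strictly greater element and
-- crediting each the moment that element arrives; same value, same O(n) cost.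

-- ===== PORT A =====
-- the Python stack `s` is held TOP-FIRST (s[-1] = head); `while s and s[-1] <= x: s.pop()`:
def popA (s : List Int) (x : Int) : List Int :=
  match s with
  | [] => []
  | t :: r => if t ≤ x then popA r x else t :: r

-- the body of A's `for j in range(n-1, -1, -1)` loop; state = (s, ans)
def stepA (arr : List Int) (st : List Int × List Int) (j : Int) : List Int × List Int :=
  let s := popA st.1 (PySem.List.pyGetD arr j 0)
  let ans := if s.isEmpty then st.2 ++ [(0 : Int)] else st.2 ++ [s.headD 0]
  (PySem.List.pyGetD arr j 0 :: s, ans)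

def save_gotham (arr : List Int) (n : Int) : Int :=
  let fin := (PySem.List.pyRange (n - 1) (-1) (-1)).foldl (stepA arr) ([], [])
  PySem.Int.mod fin.2.sum 1000000001

-- ===== PORT B =====
-- `while pending and pending[-1] < y: pending.pop(); total += y` (pending held TOP-FIRST)
def drainB (pending : List Int) (y : Int) (total : Int) : List Int × Int :=
  match pending with
  | [] => ([], total)
  | t :: r => if t < y then drainB r y (total + y) else (t :: r, total)

def save_gotham_alt (arr : List Int) (n : Int) : Int :=
  let fin := (PySem.List.pyRange 0 n 1).foldl
    (fun st k =>
      let y := PySem.List.pyGetD arr k 0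
      let d := drainB st.1 y st.2
      (y :: d.1, d.2)) ([], 0)
  PySem.Int.mod fin.2 1000000001

-- ===== PRECONDITION & SPEC =====
-- Python A raises IndexError exactly when n > len(arr) (for n ≤ 0 the loop is empty)
def Pre_save_gotham (arr : List Int) (n : Int) : Prop := n ≤ (arr.length : Int)
instance (arr : List Int) (n : Int) : Decidable (Pre_save_gotham arr n) := by
  unfold Pre_save_gotham; infer_instance
def pvWitness_save_gotham : List Int × Int := ([2, 1, 3, 1, 0, 5], 6)

def Spec_save_gotham (arr : List Int) (n : Int) (out : Int) : Prop := out = save_gotham_alt arr n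
instance (arr : List Int) (n : Int) (out : Int) : Decidable (Spec_save_gotham arr n out) := by
  unfold Spec_save_gotham; infer_instance

-- ===== CLAIM (what is proved, stated in full; the proofs are below) =====
def Claim_equal_save_gotham : Prop := ∀ (arr : List Int) (n : Int), Dom_save_gotham arr n → Pre_save_gotham arr n → Spec_save_gotham arr n (save_gotham arr n)

-- ===== LEMMAS AND PROOFS =====

-- reference: first element of l strictly greater than x (0 if none)
def firstGt (x : Int) : List Int → Int
  | [] => 0
  | y :: r => if y > x then y else firstGt x r

-- the stack A has after processing suffix l right-to-left
def stk : List Int → List Int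
  | [] => []
  | x :: r => x :: popA (stk r) x

-- the ans values A pushes while processing indices m-1, …, 0 of l (latest first)
def valsS (l : List Int) : Nat → List Int
  | 0 => []
  | m + 1 => (popA (stk (l.drop (m + 1))) (l.getD m 0)).headD 0 :: valsS l m

-- Σ_{j<m} firstGt l[j] (l.drop (j+1))
def ngePartial (l : List Int) : Nat → Int
  | 0 => 0
  | m + 1 => firstGt (l.getD m 0) (l.drop (m + 1)) + ngePartial l m

theorem popA_headD (s : List Int) (x : Int) : (popA s x).headD 0 = firstGt x s := by
  induction s with
  | nil => rfl
  | cons t r ih =>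
    simp only [popA, firstGt]
    by_cases h : t ≤ x
    · have hgt : ¬ t > x := by omega
      rw [if_pos h, if_neg hgt]; exact ih
    · have hgt : t > x := by omega
      rw [if_neg h, if_pos hgt]; rfl

theorem popA_firstGt (s : List Int) (a x : Int) (h : a ≤ x) :
    firstGt x (popA s a) = firstGt x s := by
  induction s with
  | nil => rfl
  | cons t r ih =>
    simp only [popA, firstGt]
    by_cases ht : t ≤ a
    · have : ¬ t > x := by omega
      simp [ht, this, ih]
    · simp [ht, firstGt]

theorem stk_firstGt (l : List Int) (x : Int) : firstGt x (stk l) = firstGt x l := by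
  induction l with
  | nil => rfl
  | cons a r ih =>
    simp only [stk, firstGt]
    by_cases h : a > x
    · simp [h]
    · have ha : a ≤ x := by omega
      simp [h, popA_firstGt _ _ _ ha, ih]

theorem valsS_sum (l : List Int) (m : Nat) : (valsS l m).sum = ngePartial l m := by
  induction m with
  | zero => rfl
  | succ m ih =>
    simp only [valsS, ngePartial, List.sum_cons, ih, popA_headD, stk_firstGt]

-- the main stack-loop invariant for port A
theorem loopA (arr : List Int) (N : Nat) (hN : N ≤ arr.length) :
    ∀ m : Nat, m ≤ N → ∀ ans : List Int,
      (PySem.List.pyRange ((m : Int) - 1) (-1) (-1)).foldl (stepA arr)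
        (stk ((arr.take N).drop m), ans)
      = (stk (arr.take N), ans ++ valsS (arr.take N) m) := by
  intro m
  induction m with
  | zero =>
    intro _ ans
    rw [PySem.List.pyRange_neg_one_eq_nil (by omega)]
    simp [valsS]
  | succ m ih =>
    intro hm ans
    have hmN : m < N := by omega
    have hmlen : m < arr.length := by omega
    have hlt : ((arr.take N).length) = N := by simp [Nat.min_eq_left hN]
    have hmtake : m < (arr.take N).length := by omega
    have hcast : ((m + 1 : Nat) : Int) - 1 = (m : Int) := by push_cast; ring
    rw [hcast, PySem.List.pyRange_neg_one_cons (by omega)]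
    simp only [List.foldl_cons]
    have hget : PySem.List.pyGetD arr (m : Int) 0 = (arr.take N).getD m 0 := by
      rw [PySem.List.pyGetD_natCast]
      rw [List.getD_eq_getElem _ _ hmlen, List.getD_eq_getElem _ _ hmtake]
      simp
    have hstep : stepA arr (stk ((arr.take N).drop (m + 1)), ans) (m : Int)
        = (stk ((arr.take N).drop m),
           ans ++ [(popA (stk ((arr.take N).drop (m + 1))) ((arr.take N).getD m 0)).headD 0]) := by
      simp only [stepA, hget]
      have hdrop : (arr.take N).drop m
          = (arr.take N)[m] :: (arr.take N).drop (m + 1) :=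
        (List.getElem_cons_drop hmtake).symm
      have h1 : (arr.take N).getD m 0 :: popA (stk ((arr.take N).drop (m + 1))) ((arr.take N).getD m 0)
          = stk ((arr.take N).drop m) := by
        rw [show ((arr.take N).getD m 0) = (arr.take N)[m] from List.getD_eq_getElem _ _ hmtake]
        rw [hdrop, stk]
      have h2 : (if (popA (stk ((arr.take N).drop (m + 1))) ((arr.take N).getD m 0)).isEmpty then ans ++ [(0:Int)]
            else ans ++ [(popA (stk ((arr.take N).drop (m + 1))) ((arr.take N).getD m 0)).headD 0])
          = ans ++ [(popA (stk ((arr.take N).drop (m + 1))) ((arr.take N).getD m 0)).headD 0] := by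
        cases popA (stk ((arr.take N).drop (m + 1))) ((arr.take N).getD m 0) <;> simp
      rw [h1, h2]
    rw [hstep, ih (by omega)]
    simp [valsS, List.append_assoc]

-- ngeSum l = Σ_j firstGt l[j] (l after j)
def ngeSum : List Int → Int
  | [] => 0
  | x :: r => firstGt x r + ngeSum r

theorem ngePartial_add (l : List Int) :
    ∀ m : Nat, m ≤ l.length → ngePartial l m + ngeSum (l.drop m) = ngeSum l := by
  intro m
  induction m with
  | zero => intro _; simp [ngePartial]
  | succ m ih =>
    intro hm
    have hmlen : m < l.length := by omega
    have hdrop : l.drop m = l[m] :: l.drop (m + 1) := (List.getElem_cons_drop hmlen).symm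
    have := ih (by omega)
    rw [hdrop] at this
    simp only [ngePartial, ngeSum] at this ⊢
    rw [show l.getD m 0 = l[m] from List.getD_eq_getElem _ _ hmlen]
    omega

-- B's while loop splits the (sorted) pending stack at the first element ≥ y
theorem drainB_eq (y : Int) :
    ∀ (S : List Int) (T : Int),
      drainB S y T
        = (S.dropWhile (fun t => t < y),
           T + y * ((S.takeWhile (fun t => t < y)).length : Int)) := by
  intro S
  induction S with
  | nil => intro T; simp [drainB]
  | cons t r ih =>
    intro T
    by_cases h : t < y
    · simp only [drainB, if_pos h, List.dropWhile, List.takeWhile, decide_true, h, ih,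
        if_true, Prod.mk.injEq]
      refine ⟨trivial, by push_cast [List.length_cons]; ring⟩
    · simp [drainB, h, List.dropWhile, List.takeWhile]

theorem mem_dropWhile_ge (y : Int) :
    ∀ S : List Int, S.Pairwise (· ≤ ·) →
      ∀ t ∈ S.dropWhile (fun t => t < y), y ≤ t := by
  intro S
  induction S with
  | nil => intro _ t ht; simp [List.dropWhile] at ht
  | cons a r ih =>
    intro hS t ht
    rcases List.pairwise_cons.mp hS with ⟨ha, hr⟩
    by_cases h : a < y
    · rw [List.dropWhile] at ht
      simp only [h, decide_true] at ht
      exact ih hr t ht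
    · rw [List.dropWhile] at ht
      simp only [h, decide_false] at ht
      rcases List.mem_cons.mp ht with rfl | hmem
      · omega
      · have := ha t hmem; omega

theorem sorted_stack (y : Int) (S : List Int) (hS : S.Pairwise (· ≤ ·)) :
    (y :: S.dropWhile (fun t => t < y)).Pairwise (· ≤ ·) := by
  refine List.pairwise_cons.mpr ⟨mem_dropWhile_ge y S hS, ?_⟩
  exact hS.sublist (List.dropWhile_sublist _)

-- proof-side name for B's loop body
def stepB (st : List Int × Int) (y : Int) : List Int × Int :=
  (y :: (drainB st.1 y st.2).1, (drainB st.1 y st.2).2)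

-- the invariant of B's scan: pending elements are still owed their first greater element in q
theorem runB (q : List Int) :
    ∀ (S : List Int) (T : Int), S.Pairwise (· ≤ ·) →
      (q.foldl stepB (S, T)).2
        = T + ngeSum q + (S.map (fun t => firstGt t q)).sum := by
  induction q with
  | nil =>
    intro S T _
    simp [ngeSum, firstGt]
  | cons y q ih =>
    intro S T hS
    simp only [List.foldl_cons]
    have hstep : stepB (S, T) y
        = (y :: S.dropWhile (fun t => t < y),
           T + y * ((S.takeWhile (fun t => t < y)).length : Int)) := by
      simp [stepB, drainB_eq]
    rw [hstep, ih _ _ (sorted_stack y S hS)]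
    -- split Σ_{t ∈ S} firstGt t (y :: q) along the takeWhile/dropWhile split
    have hsplit : S.map (fun t => firstGt t (y :: q))
        = (S.takeWhile (fun t => t < y)).map (fun t => firstGt t (y :: q))
          ++ (S.dropWhile (fun t => t < y)).map (fun t => firstGt t (y :: q)) := by
      rw [← List.map_append, List.takeWhile_append_dropWhile]
    have htw : (S.takeWhile (fun t => t < y)).map (fun t => firstGt t (y :: q))
        = (S.takeWhile (fun t => t < y)).map (fun _ => y) := by
      apply List.map_congr_left
      intro t ht
      have hty : t < y := by simpa using List.mem_takeWhile_imp ht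
      simp [firstGt, hty]
    have hdw : (S.dropWhile (fun t => t < y)).map (fun t => firstGt t (y :: q))
        = (S.dropWhile (fun t => t < y)).map (fun t => firstGt t q) := by
      apply List.map_congr_left
      intro t ht
      have hyt : y ≤ t := mem_dropWhile_ge y S hS t ht
      have : ¬ y > t := by omega
      simp [firstGt, this]
    rw [hsplit, htw, hdw, List.sum_append, PySem.List.sum_map_const_int]
    simp only [ngeSum, List.map_cons, List.sum_cons]
    ring

-- ===== VERDICT (by name: the statement is the Claim_ definition above) =====
theorem save_gotham_spec : Claim_equal_save_gotham := by
  intro arr n _ hpre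
  show save_gotham arr n = save_gotham_alt arr n
  simp only [save_gotham, save_gotham_alt]
  by_cases hn : n ≤ 0
  · rw [PySem.List.pyRange_neg_one_eq_nil (by omega),
        PySem.List.pyRange_one_eq_nil (by omega)]
    simp
  · push_neg at hn
    set N := n.toNat with hNdef
    have hnN : n = (N : Int) := by omega
    have hN : N ≤ arr.length := by
      unfold Pre_save_gotham at hpre; omega
    have hlen : (arr.take N).length = N := by simp [Nat.min_eq_left hN]
    have hdropN : (arr.take N).drop N = [] := by
      apply List.drop_eq_nil_of_le; omega
    -- A side: the stack sweep produces ngePartial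
    have hA := loopA arr N hN N (le_refl N) []
    rw [hdropN] at hA
    simp only [stk] at hA
    -- B side: rewrite the index loop as a fold over the list, then apply runB
    have hcong : (PySem.List.pyRange 0 (N : Int) 1).foldl
        (fun st k =>
          let y := PySem.List.pyGetD arr k 0
          let d := drainB st.1 y st.2
          ((y :: d.1, d.2) : List Int × Int)) ([], 0)
        = (PySem.List.pyRange 0 ((arr.take N).length : Int) 1).foldl
            (fun st k => stepB st (PySem.List.pyGetD (arr.take N) k 0)) ([], 0) := by
      rw [hlen]
      apply PySem.List.foldl_congr_mem
      intro st j hj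
      rcases PySem.List.mem_pyRange_one.mp hj with ⟨hj0, hjN⟩
      have hjlen : j.toNat < arr.length := by omega
      have hjtake : j.toNat < (arr.take N).length := by omega
      have : PySem.List.pyGetD arr j 0 = PySem.List.pyGetD (arr.take N) j 0 := by
        rw [PySem.List.pyGetD_eq_getElem arr 0 hj0 (by omega),
            PySem.List.pyGetD_eq_getElem (arr.take N) 0 hj0 (by omega)]
        simp
      simp only [stepB, this]
    have hB := PySem.List.foldl_pyRange_zero_pyGetD' (arr.take N) 0 stepB (([], 0) : List Int × Int)
    have hrun := runB (arr.take N) [] 0 List.Pairwise.nil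
    rw [hnN, hA, hcong, hB, hrun]
    simp [valsS_sum]
    rw [← ngePartial_add (arr.take N) N (by omega), hdropN]
    simp [ngeSum]
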